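-- pv_equiv track=rewrite | github.com/chboishabba/FRACDASH | scripts/ablate_prime_triplets.py | chain_height
-- ===== SOURCE A (Python) =====
-- def chain_height(stability: list[int], adjacency: set[tuple[int, int]]) -> int:
--     descending = [(src, dst) for src, dst in adjacency if stability[src] > stability[dst]]
--     graph = {node: [] for node in range(10)}
--     for src, dst in descending:
--         graph[src].append(dst)
--     memo: dict[int, int] = {}
--
--     def dfs(node: int) -> int:
--         if node in memo:
--             return memo[node]
--         best = 1
--         for child in graph[node]:
--             best = max(best, 1 + dfs(child))
--         memo[node] = best
--         return best
--
--     return max((dfs(node) for node in range(10)), default=0)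
-- ===== SOURCE B (Python) =====
-- def chain_height(stability: list[int], adjacency: set[tuple[int, int]]) -> int:
--     desc = [(s, d) for s, d in adjacency if stability[s] > stability[d]]
--     nodes = dict.fromkeys(n for e in desc for n in e)
--     height = {}
--     for n in sorted(nodes, key=lambda n: stability[n]):
--         best = 1
--         for s, d in desc:
--             if s == n:
--                 best = max(best, 1 + height[d])
--         height[n] = best
--     return max(height.values(), default=1)
-- ===== Notes on version B (the rewrite author's own statement) =====
-- stated objective: alternative
-- what changed: Replaces A's recursive memoized DFS over a 10-key dict with a different algorithm: collect the endpoints of descending edges, sort them by stability, and compute chain heights in one forward dynamic-programming pass (every child is processed before its parent).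
import Mathlib
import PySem

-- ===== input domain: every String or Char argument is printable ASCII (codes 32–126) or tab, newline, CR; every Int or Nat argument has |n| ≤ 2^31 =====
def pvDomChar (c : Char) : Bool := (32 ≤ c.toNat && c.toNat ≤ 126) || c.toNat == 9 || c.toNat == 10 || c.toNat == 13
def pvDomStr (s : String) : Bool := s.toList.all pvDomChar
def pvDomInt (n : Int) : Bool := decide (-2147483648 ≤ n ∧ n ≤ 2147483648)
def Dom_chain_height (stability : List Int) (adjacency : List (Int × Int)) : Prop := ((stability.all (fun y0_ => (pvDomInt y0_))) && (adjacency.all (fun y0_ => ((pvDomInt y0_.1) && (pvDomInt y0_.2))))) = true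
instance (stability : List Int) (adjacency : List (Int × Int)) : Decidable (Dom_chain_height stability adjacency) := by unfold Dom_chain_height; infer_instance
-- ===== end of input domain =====

-- B replaces A's recursive memoized DFS by a sort-by-stability order and one forward DP pass (alternative algorithm, same result).

-- ===== PORT A =====
-- dfs with memo; fuel 11 suffices on Pre_ (nodes 0..9, stability strictly decreases along edges, so recursion depth ≤ 10)
def pvDfsA (graph : PySem.Dict Int (List Int)) : Nat → PySem.Dict Int Int → Int → Int × PySem.Dict Int Int
  | 0, memo, _ => (1, memo)
  | f+1, memo, node =>
    match memo.get? node with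
    | some v => (v, memo)
    | none =>
      let r := (graph.getD node []).foldl
        (fun (acc : Int × PySem.Dict Int Int) c =>
          let t := pvDfsA graph f acc.2 c
          (max acc.1 (1 + t.1), t.2)) (1, memo)
      (r.1, r.2.insert node r.1)

def chain_height (stability : List Int) (adjacency : List (Int × Int)) : Int :=
  let descending := adjacency.filter (fun p =>
    PySem.List.pyGetD stability p.1 0 > PySem.List.pyGetD stability p.2 0)
  let graph0 : PySem.Dict Int (List Int) :=
    (PySem.List.pyRange 0 10 1).foldl (fun g n => g.insert n []) PySem.Dict.empty
  let graph := descending.foldl (fun g p => g.modify p.1 [] (fun l => l ++ [p.2])) graph0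
  let r := (PySem.List.pyRange 0 10 1).foldl
    (fun (acc : List Int × PySem.Dict Int Int) n =>
      let t := pvDfsA graph 11 acc.2 n
      (acc.1 ++ [t.1], t.2)) ([], PySem.Dict.empty)
  (PySem.List.max? r.1 (fun y => y)).getD 0

-- ===== PORT B =====
def chain_height_alt (stability : List Int) (adjacency : List (Int × Int)) : Int :=
  let desc := adjacency.filter (fun p =>
    PySem.List.pyGetD stability p.1 0 > PySem.List.pyGetD stability p.2 0)
  let nodes := PySem.List.dedup (desc.flatMap (fun p => [p.1, p.2]))
  let height := (PySem.List.sorted nodes (fun n => PySem.List.pyGetD stability n 0) false).foldl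
    (fun (h : PySem.Dict Int Int) n =>
      h.insert n (desc.foldl
        (fun best p => if p.1 == n then max best (1 + h.getD p.2 0) else best) 1)) PySem.Dict.empty
  (PySem.List.max? height.values (fun y => y)).getD 1

-- ===== PRECONDITION & SPEC =====
-- Pre_ is exactly where the Python A returns: every pair indexes stability without IndexError,
-- and both endpoints of every descending edge lie in 0..9 (otherwise A's dict raises KeyError).
def Pre_chain_height (stability : List Int) (adjacency : List (Int × Int)) : Prop :=
  ∀ p ∈ adjacency, PySem.Raise.InRange stability.length p.1 ∧ PySem.Raise.InRange stability.length p.2 ∧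
    (PySem.List.pyGetD stability p.1 0 > PySem.List.pyGetD stability p.2 0 →
      0 ≤ p.1 ∧ p.1 < 10 ∧ 0 ≤ p.2 ∧ p.2 < 10)
instance (stability : List Int) (adjacency : List (Int × Int)) : Decidable (Pre_chain_height stability adjacency) := by unfold Pre_chain_height; infer_instance

def pvWitness_chain_height : List Int × (List (Int × Int)) := ([5, 3, 1], [(0, 1), (1, 2)])

def Spec_chain_height (stability : List Int) (adjacency : List (Int × Int)) (out : Int) : Prop := out = chain_height_alt stability adjacency
instance (stability : List Int) (adjacency : List (Int × Int)) (out : Int) : Decidable (Spec_chain_height stability adjacency out) := by unfold Spec_chain_height; infer_instance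

-- ===== CLAIM (what is proved, stated in full; the proofs are below) =====
def Claim_equal_chain_height : Prop := ∀ (stability : List Int) (adjacency : List (Int × Int)), Dom_chain_height stability adjacency → Pre_chain_height stability adjacency → Spec_chain_height stability adjacency (chain_height stability adjacency)

-- ===== LEMMAS AND PROOFS =====

def pvChildren (E : List (Int × Int)) (n : Int) : List Int :=
  (E.filter (fun p => p.1 == n)).map (·.2)
def pvF (E : List (Int × Int)) : Nat → Int → Int
  | 0, _ => 1
  | f+1, n => (pvChildren E n).foldl (fun b c => max b (1 + pvF E f c)) 1
def pvRank (v : Int → Int) (n : Int) : Nat :=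
  ((Finset.range 10).filter (fun m : Nat => v (m : Int) < v n)).card
def pvHE (v : Int → Int) (E : List (Int × Int)) : Prop :=
  ∀ p ∈ E, v p.2 < v p.1 ∧ 0 ≤ p.1 ∧ p.1 < 10 ∧ 0 ≤ p.2 ∧ p.2 < 10

lemma pvRank_le_nine (v : Int → Int) (n : Int) (h0 : 0 ≤ n) (h1 : n < 10) :
    pvRank v n ≤ 9 := by
  unfold pvRank
  have hsub : (Finset.range 10).filter (fun m : Nat => v (m : Int) < v n) ⊆
      (Finset.range 10).erase n.toNat := by
    intro m hm
    simp only [Finset.mem_filter, Finset.mem_range] at hm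
    refine Finset.mem_erase.mpr ⟨?_, Finset.mem_range.mpr hm.1⟩
    intro he
    have : (m : Int) = n := by subst he; omega
    rw [this] at hm; exact lt_irrefl _ hm.2
  have := Finset.card_le_card hsub
  have hmem : n.toNat ∈ Finset.range 10 := Finset.mem_range.mpr (by omega)
  have := Finset.card_erase_of_mem hmem
  simp [Finset.card_range] at this
  omega

lemma pvRank_child_lt (v : Int → Int) {c n : Int} (hv : v c < v n) (h0 : 0 ≤ c) (h1 : c < 10) :
    pvRank v c < pvRank v n := by
  unfold pvRank
  apply Finset.card_lt_card
  constructor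
  · intro m hm
    simp only [Finset.mem_filter, Finset.mem_range] at hm ⊢
    exact ⟨hm.1, lt_trans hm.2 hv⟩
  · intro hsub
    have hc : c.toNat ∈ (Finset.range 10).filter (fun m : Nat => v (m : Int) < v n) := by
      simp only [Finset.mem_filter, Finset.mem_range]
      constructor
      · omega
      · rw [Int.toNat_of_nonneg h0]; exact hv
    have := hsub hc
    simp only [Finset.mem_filter] at this
    rw [Int.toNat_of_nonneg h0] at this
    exact lt_irrefl _ this.2

lemma pvMem_children {E : List (Int × Int)} {n c : Int} (h : c ∈ pvChildren E n) :
    (n, c) ∈ E := by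
  unfold pvChildren at h
  simp only [List.mem_map, List.mem_filter, beq_iff_eq] at h
  obtain ⟨p, ⟨hp, h1⟩, h2⟩ := h
  have : p = (n, c) := by cases p; simp_all
  rwa [this] at hp

lemma pvF_stab {v : Int → Int} {E : List (Int × Int)} (HE : pvHE v E) :
    ∀ (r : Nat) (n : Int) (f g : Nat), pvRank v n ≤ r → pvRank v n < f → pvRank v n < g →
      pvF E f n = pvF E g n := by
  intro r
  induction r with
  | zero =>
    intro n f g hr hf hg
    obtain ⟨f', rfl⟩ : ∃ f', f = f' + 1 := ⟨f - 1, by omega⟩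
    obtain ⟨g', rfl⟩ : ∃ g', g = g' + 1 := ⟨g - 1, by omega⟩
    show pvF E (f'+1) n = pvF E (g'+1) n
    simp only [pvF]
    apply PySem.List.foldl_congr_mem
    intro acc c hc
    exfalso
    have he := pvMem_children hc
    obtain ⟨hv, -, -, hc0, hc1⟩ := HE _ he
    have := pvRank_child_lt (c := c) (n := n) v hv hc0 hc1
    omega
  | succ r ih =>
    intro n f g hr hf hg
    obtain ⟨f', rfl⟩ : ∃ f', f = f' + 1 := ⟨f - 1, by omega⟩
    obtain ⟨g', rfl⟩ : ∃ g', g = g' + 1 := ⟨g - 1, by omega⟩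
    simp only [pvF]
    apply PySem.List.foldl_congr_mem
    intro acc c hc
    have he := pvMem_children hc
    obtain ⟨hv, -, -, hc0, hc1⟩ := HE _ he
    have hlt := pvRank_child_lt (c := c) (n := n) v hv hc0 hc1
    have : pvF E f' c = pvF E g' c := ih c f' g' (by omega) (by omega) (by omega)
    rw [this]

lemma pvOne_le_F (E : List (Int × Int)) (f : Nat) (n : Int) : 1 ≤ pvF E f n := by
  cases f with
  | zero => simp [pvF]
  | succ f =>
    simp only [pvF]
    exact (PySem.List.le_foldl_max_int _ _ _).1

lemma pvF_eq_one {E : List (Int × Int)} {n : Int} (h : ∀ p ∈ E, p.1 ≠ n) :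
    pvF E 10 n = 1 := by
  have hc : pvChildren E n = [] := by
    unfold pvChildren
    rw [List.filter_eq_nil_iff.mpr]
    · rfl
    · intro p hp
      simp [h p hp]
  show pvF E (9+1) n = 1
  simp only [pvF, hc, List.foldl_nil]

def pvInv (E : List (Int × Int)) (memo : PySem.Dict Int Int) : Prop :=
  ∀ k x, memo.get? k = some x → x = pvF E 10 k

lemma pvGraph0_getD (l : List Int) (g : PySem.Dict Int (List Int))
    (hg : ∀ k, g.getD k [] = []) (k : Int) :
    (l.foldl (fun g n => g.insert n []) g).getD k [] = [] := by
  induction l generalizing g with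
  | nil => exact hg k
  | cons x xs ih =>
    simp only [List.foldl_cons]
    apply ih
    intro k'
    rw [PySem.Dict.getD_insert]
    split <;> simp [hg]

lemma pvChildren_bounds {v : Int → Int} {E : List (Int × Int)} (HE : pvHE v E)
    {n c : Int} (hc : c ∈ pvChildren E n) : 0 ≤ c ∧ c < 10 ∧ v c < v n := by
  obtain ⟨hv, -, -, hc0, hc1⟩ := HE _ (pvMem_children hc)
  exact ⟨hc0, hc1, hv⟩

lemma pvF_node {v : Int → Int} {E : List (Int × Int)} (HE : pvHE v E)
    {n : Int} (hn0 : 0 ≤ n) (hn1 : n < 10) :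
    (pvChildren E n).foldl (fun b c => max b (1 + pvF E 10 c)) 1 = pvF E 10 n := by
  have hstep : pvF E (pvRank v n + 1) n
      = (pvChildren E n).foldl (fun b c => max b (1 + pvF E (pvRank v n) c)) 1 := rfl
  have hcongr : (pvChildren E n).foldl (fun b c => max b (1 + pvF E 10 c)) 1
      = (pvChildren E n).foldl (fun b c => max b (1 + pvF E (pvRank v n) c)) 1 := by
    apply PySem.List.foldl_congr_mem
    intro acc c hc
    obtain ⟨hc0, hc1, hcv⟩ := pvChildren_bounds HE hc
    have hlt := pvRank_child_lt (c := c) (n := n) v hcv hc0 hc1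
    have hle := pvRank_le_nine v c hc0 hc1
    rw [pvF_stab HE 9 c 10 (pvRank v n) hle (by omega) (by omega)]
  rw [hcongr, ← hstep]
  have h9 := pvRank_le_nine v n hn0 hn1
  exact pvF_stab HE 9 n (pvRank v n + 1) 10 h9 (by omega) (by omega)

lemma pvDfs_correct {v : Int → Int} {E : List (Int × Int)} (HE : pvHE v E)
    {graph : PySem.Dict Int (List Int)} (hg : ∀ n, graph.getD n [] = pvChildren E n) :
    ∀ (f : Nat) (n : Int) (memo : PySem.Dict Int Int),
      pvRank v n < f → 0 ≤ n → n < 10 → pvInv E memo →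
      (pvDfsA graph f memo n).1 = pvF E 10 n ∧ pvInv E (pvDfsA graph f memo n).2 := by
  intro f
  induction f with
  | zero => intro n memo hr _ _ _; omega
  | succ f ihf =>
    intro n memo hr hn0 hn1 hinv
    cases hmg : memo.get? n with
    | some x =>
      have hred : pvDfsA graph (f+1) memo n = (x, memo) := by
        simp only [pvDfsA, hmg]
      rw [hred]
      exact ⟨by simpa using hinv n x hmg, hinv⟩
    | none =>
      have aux : ∀ (cs : List Int), (∀ c ∈ cs, c ∈ pvChildren E n) →
          ∀ (acc : Int × PySem.Dict Int Int), pvInv E acc.2 →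
          (cs.foldl (fun (acc : Int × PySem.Dict Int Int) c =>
            let t := pvDfsA graph f acc.2 c
            (max acc.1 (1 + t.1), t.2)) acc).1
            = cs.foldl (fun b c => max b (1 + pvF E 10 c)) acc.1 ∧
          pvInv E (cs.foldl (fun (acc : Int × PySem.Dict Int Int) c =>
            let t := pvDfsA graph f acc.2 c
            (max acc.1 (1 + t.1), t.2)) acc).2 := by
        intro cs
        induction cs with
        | nil => intro _ acc h; exact ⟨rfl, h⟩
        | cons c cs ihc =>
          intro hmem acc hacc
          obtain ⟨hc0, hc1, hcv⟩ := pvChildren_bounds HE (hmem c (List.mem_cons_self))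
          have hrank : pvRank v c < f := by
            have := pvRank_child_lt (c := c) (n := n) v hcv hc0 hc1
            omega
          obtain ⟨hval, hinv2⟩ := ihf c acc.2 hrank hc0 hc1 hacc
          simp only [List.foldl_cons, hval]
          exact ihc (fun c2 hc2 => hmem c2 (List.mem_cons_of_mem _ hc2)) _ hinv2
      obtain ⟨h1, h2⟩ := aux (graph.getD n []) (by rw [hg]; exact fun c h => h) (1, memo) hinv
      have hbest : ((graph.getD n []).foldl
          (fun (acc : Int × PySem.Dict Int Int) c =>
            let t := pvDfsA graph f acc.2 c
            (max acc.1 (1 + t.1), t.2)) (1, memo)).1 = pvF E 10 n := by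
        rw [h1, hg]
        exact pvF_node HE hn0 hn1
      have hred : pvDfsA graph (f+1) memo n
          = (((graph.getD n []).foldl
          (fun (acc : Int × PySem.Dict Int Int) c =>
            let t := pvDfsA graph f acc.2 c
            (max acc.1 (1 + t.1), t.2)) (1, memo)).1,
            ((graph.getD n []).foldl
          (fun (acc : Int × PySem.Dict Int Int) c =>
            let t := pvDfsA graph f acc.2 c
            (max acc.1 (1 + t.1), t.2)) (1, memo)).2.insert n
            (((graph.getD n []).foldl
          (fun (acc : Int × PySem.Dict Int Int) c =>
            let t := pvDfsA graph f acc.2 c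
            (max acc.1 (1 + t.1), t.2)) (1, memo)).1)) := by
        simp only [pvDfsA, hmg]
      rw [hred]
      refine ⟨hbest, ?_⟩
      intro k x hk
      rw [PySem.Dict.get?_insert] at hk
      split at hk
      · rename_i hkeq
        injection hk with hk
        subst hkeq
        rw [← hk, hbest]
      · exact h2 k x hk

lemma pvDfs_vals {v : Int → Int} {E : List (Int × Int)} (HE : pvHE v E)
    {graph : PySem.Dict Int (List Int)} (hg : ∀ n, graph.getD n [] = pvChildren E n) :
    ∀ (ns : List Int), (∀ n ∈ ns, 0 ≤ n ∧ n < 10) →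
      ∀ (acc : List Int × PySem.Dict Int Int), pvInv E acc.2 →
      (ns.foldl (fun (acc : List Int × PySem.Dict Int Int) n =>
        let t := pvDfsA graph 11 acc.2 n
        (acc.1 ++ [t.1], t.2)) acc).1 = acc.1 ++ ns.map (pvF E 10) := by
  intro ns
  induction ns with
  | nil => intro _ acc _; simp
  | cons n ns ih =>
    intro hmem acc hacc
    obtain ⟨hn0, hn1⟩ := hmem n List.mem_cons_self
    have hrank : pvRank v n < 11 := by
      have := pvRank_le_nine v n hn0 hn1; omega
    obtain ⟨hval, hinv2⟩ := pvDfs_correct HE hg 11 n acc.2 hrank hn0 hn1 hacc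
    simp only [List.foldl_cons, hval]
    rw [ih (fun m hm => hmem m (List.mem_cons_of_mem _ hm)) _ hinv2]
    simp

lemma pvItems_getD {h : PySem.Dict Int Int} {done : List Int} {E : List (Int × Int)}
    (hi : h.items = done.map (fun k => (k, pvF E 10 k))) (hnd : done.Nodup)
    {c : Int} (hc : c ∈ done) : h.getD c 0 = pvF E 10 c := by
  have hkeys : h.keys = done := by
    show h.items.map (·.1) = done
    rw [hi, List.map_map]
    exact List.map_id' done
  have hmem : (c, pvF E 10 c) ∈ h.items := by
    rw [hi]
    exact List.mem_map.mpr ⟨c, hc, rfl⟩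
  have := PySem.Dict.get?_of_mem_items h hmem (by rw [hkeys]; exact hnd)
  rw [PySem.Dict.getD_eq_get?_getD, this]
  rfl

lemma pvB_loop {v : Int → Int} {E : List (Int × Int)} (HE : pvHE v E) :
    ∀ (rest done : List Int) (h : PySem.Dict Int Int),
      (done ++ rest).Nodup →
      ((done ++ rest).Pairwise (fun a b => v a ≤ v b)) →
      (∀ p ∈ E, p.2 ∈ done ++ rest) →
      (∀ x ∈ done ++ rest, 0 ≤ x ∧ x < 10) →
      h.items = done.map (fun k => (k, pvF E 10 k)) →
      (rest.foldl (fun (h : PySem.Dict Int Int) n =>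
        h.insert n (E.foldl
          (fun best p => if p.1 == n then max best (1 + h.getD p.2 0) else best) 1)) h).items
        = (done ++ rest).map (fun k => (k, pvF E 10 k)) := by
  intro rest
  induction rest with
  | nil => intro done h _ _ _ _ hi; simpa using hi
  | cons n rest ih =>
    intro done h hnd hpw hcl hbd hi
    have hdn : done.Nodup := (List.nodup_append.mp hnd).1
    obtain ⟨hn0, hn1⟩ := hbd n (by simp)
    -- n not a key of h
    have hnotin : n ∉ done := by
      intro hmem
      exact (List.nodup_append.mp hnd).2.2 n hmem n (by simp) rfl
    -- best value computed for n equals pvF E 10 n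
    have hbest : E.foldl (fun best p => if p.1 == n then max best (1 + h.getD p.2 0) else best) 1
        = pvF E 10 n := by
      rw [PySem.List.foldl_if_eq_foldl_filter]
      have hmapfold : (E.filter (fun p => p.1 == n)).foldl
            (fun best p => max best (1 + h.getD p.2 0)) 1
          = (pvChildren E n).foldl (fun best c => max best (1 + h.getD c 0)) 1 := by
        unfold pvChildren
        rw [List.foldl_map]
      rw [hmapfold]
      have hcongr : (pvChildren E n).foldl (fun best c => max best (1 + h.getD c 0)) 1
          = (pvChildren E n).foldl (fun best c => max best (1 + pvF E 10 c)) 1 := by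
        apply PySem.List.foldl_congr_mem
        intro acc c hc
        -- c is in done
        have hedge := pvMem_children hc
        obtain ⟨hcv, -, -, hc0, hc1⟩ := HE _ hedge
        have hcin : c ∈ done ++ n :: rest := hcl (n, c) hedge
        have hcdone : c ∈ done := by
          rcases List.mem_append.mp hcin with hL | hR
          · exact hL
          · exfalso
            rcases List.mem_cons.mp hR with rfl | hR2
            · exact lt_irrefl _ hcv
            · -- n before c in pairwise list: v n ≤ v c, contradiction with v c < v n
              have hp := (List.pairwise_append.mp hpw).2
              have hp2 := List.pairwise_cons.mp hp.1
              have := hp2.1 c hR2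
              exact absurd hcv (not_lt.mpr this)
        rw [pvItems_getD hi hdn hcdone]
      rw [hcongr]
      exact pvF_node HE hn0 hn1
    simp only [List.foldl_cons, hbest]
    have hi2 : (h.insert n (pvF E 10 n)).items = (done ++ [n]).map (fun k => (k, pvF E 10 k)) := by
      have hnc : h.contains n = false := by
        by_contra hcn
        have : h.contains n = true := by simpa using hcn
        have := (PySem.Dict.contains_iff_mem_keys h n).mp this
        have hkeys : h.keys = done := by
          show h.items.map (·.1) = done
          rw [hi, List.map_map]; exact List.map_id' done
        rw [hkeys] at this
        exact hnotin this
      rw [PySem.Dict.items_insert_of_not_contains h _ hnc, hi]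
      simp
    have := ih (done ++ [n]) (h.insert n (pvF E 10 n))
      (by simpa using hnd) (by simpa using hpw)
      (by intro p hp; simpa using hcl p hp)
      (by intro x hx; apply hbd; simpa using hx) hi2
    simpa using this

lemma pvMax_glue {E : List (Int × Int)}
    (order : List Int)
    (hmem : ∀ x, x ∈ order ↔ ∃ p ∈ E, x = p.1 ∨ x = p.2)
    (hbd : ∀ x ∈ order, 0 ≤ x ∧ x < 10) :
    (PySem.List.max? (order.map (pvF E 10)) (fun y => y)).getD 1
      = (PySem.List.max? ((PySem.List.pyRange 0 10 1).map (pvF E 10)) (fun y => y)).getD 0 := by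
  have hr0 : (0 : Int) ∈ PySem.List.pyRange 0 10 1 := PySem.List.mem_pyRange_one.mpr (by omega)
  have hrne : (PySem.List.pyRange 0 10 1).map (pvF E 10) ≠ [] := by
    intro h
    have : pvF E 10 0 ∈ (PySem.List.pyRange 0 10 1).map (pvF E 10) :=
      List.mem_map.mpr ⟨0, hr0, rfl⟩
    rw [h] at this
    simp at this
  cases hm1 : PySem.List.max? ((PySem.List.pyRange 0 10 1).map (pvF E 10)) (fun y => y) with
  | none => exact absurd ((PySem.List.max?_eq_none_iff _ _).mp hm1) hrne
  | some m1 =>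
    have hm1mem := PySem.List.max?_mem hm1
    have hm1max := PySem.List.max?_isMax hm1
    obtain ⟨y, hy, rfl⟩ := List.mem_map.mp hm1mem
    cases hm2 : PySem.List.max? (order.map (pvF E 10)) (fun y => y) with
    | none =>
      have hord : order = [] := by
        have := (PySem.List.max?_eq_none_iff _ _).mp hm2
        exact List.map_eq_nil_iff.mp this
      have hE : ∀ n : Int, pvF E 10 n = 1 := by
        intro n
        apply pvF_eq_one
        intro p hp
        exfalso
        have : p.1 ∈ order := (hmem p.1).mpr ⟨p, hp, Or.inl rfl⟩
        rw [hord] at this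
        simp at this
      show (1 : Int) = pvF E 10 y
      rw [hE y]
    | some m2 =>
      have hm2mem := PySem.List.max?_mem hm2
      have hm2max := PySem.List.max?_isMax hm2
      obtain ⟨x, hx, rfl⟩ := List.mem_map.mp hm2mem
      show pvF E 10 x = pvF E 10 y
      apply le_antisymm
      · obtain ⟨hx0, hx1⟩ := hbd x hx
        have : x ∈ PySem.List.pyRange 0 10 1 := PySem.List.mem_pyRange_one.mpr ⟨hx0, hx1⟩
        exact hm1max _ (List.mem_map.mpr ⟨x, this, rfl⟩)
      · by_cases hyo : y ∈ order
        · exact hm2max _ (List.mem_map.mpr ⟨y, hyo, rfl⟩)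
        · have h1 : pvF E 10 y = 1 := by
            apply pvF_eq_one
            intro p hp hpy
            exact hyo ((hmem y).mpr ⟨p, hp, Or.inl hpy.symm⟩)
          rw [h1]
          exact pvOne_le_F E 10 x

-- ===== VERDICT (by name: the statement is the Claim_ definition above) =====
theorem chain_height_spec : Claim_equal_chain_height := by
  intro stability adjacency hdom hpre
  unfold Spec_chain_height
  simp only [chain_height, chain_height_alt]
  set v : Int → Int := fun i => PySem.List.pyGetD stability i 0 with hv
  set E : List (Int × Int) := adjacency.filter (fun p =>
    PySem.List.pyGetD stability p.1 0 > PySem.List.pyGetD stability p.2 0) with hE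
  have HE : pvHE v E := by
    intro p hp
    rw [hE, List.mem_filter] at hp
    obtain ⟨hpa, hpd⟩ := hp
    have hgt : v p.1 > v p.2 := by
      rw [hv]
      exact of_decide_eq_true hpd
    obtain ⟨-, -, hbnd⟩ := hpre p hpa
    obtain ⟨h1, h2, h3, h4⟩ := hbnd hgt
    exact ⟨hgt, h1, h2, h3, h4⟩
  -- A side
  have hg0 : ∀ k : Int, ((PySem.List.pyRange 0 10 1).foldl
      (fun (g : PySem.Dict Int (List Int)) n => g.insert n []) PySem.Dict.empty).getD k [] = [] :=
    pvGraph0_getD _ _ (fun k => PySem.Dict.getD_empty k [])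
  have hg : ∀ n : Int, (E.foldl (fun g p => g.modify p.1 [] (fun l => l ++ [p.2]))
      ((PySem.List.pyRange 0 10 1).foldl
        (fun (g : PySem.Dict Int (List Int)) n => g.insert n []) PySem.Dict.empty)).getD n []
      = pvChildren E n := by
    intro n
    rw [PySem.Dict.getD_foldl_modify_append, hg0 n]
    rfl
  have hbounds : ∀ n ∈ PySem.List.pyRange 0 10 1, (0:Int) ≤ n ∧ n < 10 := by
    intro n hn
    exact PySem.List.mem_pyRange_one.mp hn
  have hAvals := pvDfs_vals HE hg (PySem.List.pyRange 0 10 1) hbounds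
    (([] : List Int), PySem.Dict.empty)
    (by intro k x hk; rw [PySem.Dict.get?_empty] at hk; exact absurd hk (by simp))
  rw [hAvals]
  -- B side
  set nodes : List Int := PySem.List.dedup (E.flatMap (fun p => [p.1, p.2])) with hnodes
  set order : List Int := PySem.List.sorted nodes v false with horder
  have hond : order.Nodup := ((PySem.List.sorted_perm nodes v false).nodup_iff).mpr
    (PySem.List.nodup_dedup _)
  have hopw : order.Pairwise (fun a b => v a ≤ v b) := PySem.List.sorted_pairwise nodes v
  have homem : ∀ x, x ∈ order ↔ ∃ p ∈ E, x = p.1 ∨ x = p.2 := by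
    intro x
    rw [horder, PySem.List.mem_sorted, hnodes, PySem.List.mem_dedup, List.mem_flatMap]
    constructor
    · rintro ⟨p, hp, hx⟩; exact ⟨p, hp, by simpa using hx⟩
    · rintro ⟨p, hp, hx⟩; exact ⟨p, hp, by simpa using hx⟩
  have hobd : ∀ x ∈ order, (0:Int) ≤ x ∧ x < 10 := by
    intro x hx
    obtain ⟨p, hp, hx2⟩ := (homem x).mp hx
    obtain ⟨-, h1, h2, h3, h4⟩ := HE p hp
    rcases hx2 with rfl | rfl
    · exact ⟨h1, h2⟩
    · exact ⟨h3, h4⟩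
  have hcl : ∀ p ∈ E, p.2 ∈ order := fun p hp => (homem p.2).mpr ⟨p, hp, Or.inr rfl⟩
  have hBitems := pvB_loop HE order [] PySem.Dict.empty (by simpa using hond)
    (by simpa using hopw) (by simpa using hcl) (by simpa using hobd) (by rfl)
  have hvals : (order.foldl (fun (h : PySem.Dict Int Int) n =>
      h.insert n (E.foldl
        (fun best p => if p.1 == n then max best (1 + h.getD p.2 0) else best) 1))
      PySem.Dict.empty).values = order.map (pvF E 10) := by
    show (order.foldl (fun (h : PySem.Dict Int Int) n =>
      h.insert n (E.foldl
        (fun best p => if p.1 == n then max best (1 + h.getD p.2 0) else best) 1))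
      PySem.Dict.empty).items.map (·.2) = order.map (pvF E 10)
    rw [hBitems, List.nil_append, List.map_map]
    rfl
  rw [hvals, List.nil_append]
  exact (pvMax_glue order homem hobd).symm
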